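-- pv_equiv track=rewrite | github.com/veeraollila/trak24s | viikko_3/forbidden.py | count
-- ===== SOURCE A (Python) =====
-- def count(s):
--     not_a_counter = 0
--     length = 0
--
--     for char in s:
--         if char != "a":
--             length += 1
--             not_a_counter += length
--         else:
--             length = 0
--
--     return not_a_counter
-- ===== SOURCE B (Python) =====
-- from itertools import groupby
--
-- def count(s):
--     total = 0
--     for is_not_a, grp in groupby(s, key=lambda c: c != "a"):
--         if is_not_a:
--             n = sum(1 for _ in grp)
--             total += n * (n + 1) // 2
--     return total
-- ===== Notes on version B (the rewrite author's own statement) =====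
-- stated objective: alternative
-- what changed: Replaces the per-character running-length accumulation with a groupby pass that splits the string into maximal non-'a' runs and adds the closed-form triangular number L*(L+1)//2 per run.
import Mathlib
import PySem

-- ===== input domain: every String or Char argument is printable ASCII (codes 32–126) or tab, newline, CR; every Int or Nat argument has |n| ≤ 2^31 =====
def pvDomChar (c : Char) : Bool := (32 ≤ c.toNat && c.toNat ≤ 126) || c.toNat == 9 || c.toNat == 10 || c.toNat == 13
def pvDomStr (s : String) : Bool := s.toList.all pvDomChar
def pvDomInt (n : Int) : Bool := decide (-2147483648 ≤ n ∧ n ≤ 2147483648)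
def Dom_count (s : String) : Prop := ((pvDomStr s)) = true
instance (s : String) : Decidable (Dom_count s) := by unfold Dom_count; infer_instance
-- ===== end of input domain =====

-- B replaces A's running-length accumulation with a groupby-into-maximal-runs pass
-- adding the closed-form triangular number per non-'a' run (alternative, same cost).


-- ===== PORT A =====
-- for char in s: if char != 'a': length += 1; not_a_counter += length else: length = 0
def count (s : String) : Int :=
  (s.toList.foldl
    (fun (st : Int × Int) char =>
      if char ≠ 'a' then (st.1 + (st.2 + 1), st.2 + 1) else (st.1, 0))
    (0, 0)).1

-- ===== PORT B =====
-- groupby(s, key=λc. c ≠ 'a'): peel one maximal run at a time; a True run of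
-- length n contributes n*(n+1)//2, a False run ('a's) contributes nothing —
-- realised as: take the leading non-'a' run, then drop it and the single 'a'
-- that ended it, and recurse.
def countRuns : List Char → Int
  | [] => 0
  | x :: xs =>
    let n := ((x :: xs).takeWhile (fun c => c ≠ 'a')).length
    ((n * (n + 1)) / 2 : Nat) + countRuns (((x :: xs).dropWhile (fun c => c ≠ 'a')).drop 1)
termination_by l => l.length
decreasing_by
  have h := List.length_dropWhile_le (p := fun c => c ≠ 'a') (l := x :: xs)
  simp only [List.length_drop, List.length_cons] at *
  omega

def count_alt (s : String) : Int := countRuns s.toList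

-- ===== PRECONDITION & SPEC =====
def Spec_count (s : String) (out : Int) : Prop := out = count_alt s
instance (s : String) (out : Int) : Decidable (Spec_count s out) := by unfold Spec_count; infer_instance

-- ===== CLAIM (what is proved, stated in full; the proofs are below) =====
def Claim_equal_count : Prop := ∀ (s : String), Dom_count s → Spec_count s (count s)

-- ===== LEMMAS AND PROOFS =====

-- the counter contribution of the remaining list given current run length l
def T : Int → List Char → Int
  | _, [] => 0
  | l, x :: xs => if x ≠ 'a' then (l + 1) + T (l + 1) xs else T 0 xs

theorem foldl_eq_T (xs : List Char) : ∀ (c l : Int),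
    (xs.foldl
      (fun (st : Int × Int) char =>
        if char ≠ 'a' then (st.1 + (st.2 + 1), st.2 + 1) else (st.1, 0))
      (c, l)).1 = c + T l xs := by
  induction xs with
  | nil => intro c l; simp [T]
  | cons x xs ih =>
    intro c l
    rw [List.foldl_cons]
    by_cases hx : x = 'a'
    · rw [if_neg (by simp [hx])]
      rw [ih]
      simp [T, hx]
    · rw [if_pos (by simp [hx])]
      rw [ih]
      simp only [T, if_pos (show x ≠ 'a' from hx)]
      ring

theorem T_shift (xs : List Char) : ∀ (l : Int),
    T l xs = T 0 xs + l * ((xs.takeWhile (fun c => c ≠ 'a')).length : Int) := by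
  induction xs with
  | nil => intro l; simp [T]
  | cons x xs ih =>
    intro l
    by_cases hx : x = 'a'
    · simp [hx, T, List.takeWhile]
    · have hd : (decide (x ≠ 'a')) = true := by simp [hx]
      simp only [T, if_pos (show x ≠ 'a' from hx), List.takeWhile_cons, hd, if_true,
        List.length_cons]
      rw [ih (l + 1), show (0:Int) + 1 = 1 from rfl, ih 1]
      push_cast
      ring

theorem tri_succ (r : Nat) :
    (((r + 1) * (r + 1 + 1)) / 2 : Nat) = ((r * (r + 1)) / 2 : Nat) + (r + 1) := by
  have he : 2 ∣ r * (r + 1) := Nat.even_mul_succ_self r |>.two_dvd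
  have h1 : 2 * ((r * (r + 1)) / 2) = r * (r + 1) := Nat.mul_div_cancel' he
  have he2 : 2 ∣ (r + 1) * (r + 1 + 1) := Nat.even_mul_succ_self (r + 1) |>.two_dvd
  have h2 : 2 * (((r + 1) * (r + 1 + 1)) / 2) = (r + 1) * (r + 1 + 1) := Nat.mul_div_cancel' he2
  have hr : (r + 1) * (r + 1 + 1) = r * (r + 1) + 2 * (r + 1) := by ring
  omega

theorem T_eq_countRuns : ∀ (xs : List Char), T 0 xs = countRuns xs := by
  intro xs
  induction hn : xs.length using Nat.strong_induction_on generalizing xs with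
  | _ n ih =>
    match xs with
    | [] => simp [T, countRuns]
    | x :: xs =>
      by_cases hx : x = 'a'
      · have hdw : (x :: xs).dropWhile (fun c => c ≠ 'a') = x :: xs := by
          simp [List.dropWhile, hx]
        subst hx
        rw [countRuns]
        simp only [hdw, List.takeWhile_cons]
        simp [T]
        exact ih xs.length (by simp [← hn]) xs rfl
      · have hd : (decide (x ≠ 'a')) = true := by simp [hx]
        have hdw : (x :: xs).dropWhile (fun c => c ≠ 'a') = xs.dropWhile (fun c => c ≠ 'a') := by
          simp [List.dropWhile, hd]
        have hT : T 0 (x :: xs) = 1 + T 0 xs + ((xs.takeWhile (fun c => c ≠ 'a')).length : Int) := by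
          simp only [T, if_pos (show x ≠ 'a' from hx), show (0:Int) + 1 = 1 from rfl]
          rw [T_shift xs 1]; ring
        have ihxs : T 0 xs = countRuns xs := ih xs.length (by simp [← hn]) xs rfl
        rw [countRuns]
        simp only [List.takeWhile_cons, hd, if_true, List.length_cons, hdw]
        match xs, ihxs with
        | [], _ => simp [T, hx, countRuns, List.takeWhile]
        | y :: ys, ihxs =>
          rw [hT, ihxs, countRuns]
          rw [tri_succ ((y :: ys).takeWhile (fun c => c ≠ 'a')).length]
          push_cast
          ring

-- ===== VERDICT (by name: the statement is the Claim_ definition above) =====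
theorem count_spec : Claim_equal_count := by
  intro s _
  unfold Spec_count count count_alt
  rw [foldl_eq_T, T_eq_countRuns]
  simp
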